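-- pv_equiv track=rewrite | github.com/NekoRollex/SW305_Problemas | Algoritmo Naive/p02_MC.py | BusquedaNaive
-- ===== SOURCE A (Python) =====
-- def BusquedaNaive(cadena: str , patron: str):
--     comparaciones = 0
--     posiciones = []
--     i = 0
--     j = 0
--     n1 = len(cadena)
--     n2 = len(patron)
--
--     if n1 < n2:
--         return None
--
--     while i < n1:
--         if cadena[i] == patron[0]:
--             k = i
--             j = 0
--             while (k < n1 and j < n2) and patron[j] == cadena[k]:
--                 k += 1
--                 j += 1
--             if j == n2:
--                 posiciones.append(i)
--         else:
--             comparaciones += 1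
--         i += 1
--     return posiciones, comparaciones
-- ===== SOURCE B (Python) =====
-- def BusquedaNaive(cadena: str, patron: str):
--     n1 = len(cadena)
--     n2 = len(patron)
--     if n1 < n2:
--         return None
--     comparaciones = sum(1 for c in cadena if c != patron[0])
--     posiciones = [i for i in range(n1 - n2 + 1) if cadena[i:i + n2] == patron]
--     return posiciones, comparaciones
-- ===== Notes on version B (the rewrite author's own statement) =====
-- stated objective: simpler
-- what changed: A's outer scan with a first-char gate and a hand-written inner character-matching loop plus an in-loop mismatch counter is replaced by a slice-equality comprehension over the n-m+1 candidate starts and a separate one-pass sum counting characters different from patron[0].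
-- outside the precondition, e.g. on BusquedaNaive('', ''): A returns ([], 0), B returns ([0], 0); on BusquedaNaive('x', ''): A raises IndexError, B raises IndexError
import Mathlib
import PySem

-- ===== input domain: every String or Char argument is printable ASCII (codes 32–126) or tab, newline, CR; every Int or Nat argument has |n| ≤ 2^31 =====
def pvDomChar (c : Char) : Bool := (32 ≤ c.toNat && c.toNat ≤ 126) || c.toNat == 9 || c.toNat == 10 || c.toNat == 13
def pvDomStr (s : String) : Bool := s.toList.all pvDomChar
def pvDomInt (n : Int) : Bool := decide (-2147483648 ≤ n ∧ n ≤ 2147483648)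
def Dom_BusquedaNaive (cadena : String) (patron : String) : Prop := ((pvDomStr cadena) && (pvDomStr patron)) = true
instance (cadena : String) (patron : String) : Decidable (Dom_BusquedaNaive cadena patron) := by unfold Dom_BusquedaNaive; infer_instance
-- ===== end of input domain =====

-- B replaces A's hand-written first-char gate + inner matching loop by one slice comparison per
-- candidate start over range(n1-n2+1), and computes the mismatch count by a separate one-pass sum
-- (objective: simpler).

-- ===== PORT A =====
-- inner while: `while (k < n1 and j < n2) and patron[j] == cadena[k]: k += 1; j += 1`; returns the final j
def pvInnerMC (cs ps : List Char) (k j : Nat) : Nat :=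
  if k < cs.length ∧ j < ps.length ∧ ps.getD j ' ' = cs.getD k ' ' then
    pvInnerMC cs ps (k + 1) (j + 1)
  else j
termination_by ps.length - j
decreasing_by omega


-- outer while over i, carrying `posiciones` and `comparaciones`
def pvOuterMC (cs ps : List Char) (i : Nat) (pos : List Int) (comp : Int) : List Int × Int :=
  if h : i < cs.length then
    if cs.getD i ' ' = ps.getD 0 ' ' then
      pvOuterMC cs ps (i + 1)
        (if pvInnerMC cs ps i 0 = ps.length then pos ++ [(i : Int)] else pos) comp
    else
      pvOuterMC cs ps (i + 1) pos (comp + 1)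
  else (pos, comp)
termination_by cs.length - i

def BusquedaNaive (cadena : String) (patron : String) : Option (List Int × Int) :=
  let cs := cadena.toList
  let ps := patron.toList
  if cs.length < ps.length then none
  else some (pvOuterMC cs ps 0 [] 0)

-- ===== PORT B =====
def BusquedaNaive_alt (cadena : String) (patron : String) : Option (List Int × Int) :=
  let cs := cadena.toList
  let ps := patron.toList
  let n1 := cs.length
  let n2 := ps.length
  if n1 < n2 then none
  else
    -- comparaciones = sum(1 for c in cadena if c != patron[0])
    let comparaciones : Int := ((cs.filter (fun c => c != ps.getD 0 ' ')).map (fun _ => (1 : Int))).sum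
    -- posiciones = [i for i in range(n1 - n2 + 1) if cadena[i:i + n2] == patron]
    let posiciones : List Int := (PySem.List.pyRange 0 ((n1 - n2 + 1 : Nat) : Int) 1).filter
        (fun i => PySem.List.slice cs (some i) (some (i + (n2 : Int))) == ps)
    some (posiciones, comparaciones)

-- ===== PRECONDITION & SPEC =====
-- Pre_ excludes the empty pattern: there A raises IndexError on `patron[0]` whenever cadena is
-- nonempty, and on the remaining corner ("", "") — an unspecified empty-pattern corner — A's
-- ([], 0) (no occurrence recorded) and B's ([0], 0) (the empty pattern occurs at 0) are both defensible.
def Pre_BusquedaNaive (cadena : String) (patron : String) : Prop := patron.toList ≠ []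
instance (cadena : String) (patron : String) : Decidable (Pre_BusquedaNaive cadena patron) := by
  unfold Pre_BusquedaNaive; infer_instance

def pvWitness_BusquedaNaive : String × String := ("abcabca b", "ab")

def Spec_BusquedaNaive (cadena : String) (patron : String) (out : Option (List Int × Int)) : Prop := out = BusquedaNaive_alt cadena patron
instance (cadena : String) (patron : String) (out : Option (List Int × Int)) : Decidable (Spec_BusquedaNaive cadena patron out) := by unfold Spec_BusquedaNaive; infer_instance

-- ===== CLAIM (what is proved, stated in full; the proofs are below) =====
def Claim_equal_BusquedaNaive : Prop := ∀ (cadena : String) (patron : String), Dom_BusquedaNaive cadena patron → Pre_BusquedaNaive cadena patron → Spec_BusquedaNaive cadena patron (BusquedaNaive cadena patron)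

-- ===== LEMMAS AND PROOFS =====

-- A's inner loop, started at (k, j), reaches j = |ps| iff ps.drop j is a prefix of cs.drop k
theorem pvInnerMC_eq_iff (cs ps : List Char) (k j : Nat) :
    j ≤ ps.length → (pvInnerMC cs ps k j = ps.length ↔ ps.drop j <+: cs.drop k) := by
  induction k, j using pvInnerMC.induct cs ps with
  | case1 k j h ih =>
    intro hj
    rw [pvInnerMC, if_pos h]
    obtain ⟨hk, hjl, he⟩ := h
    rw [ih (by omega)]
    rw [List.drop_eq_getElem_cons hjl, List.drop_eq_getElem_cons hk, List.cons_prefix_cons]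
    constructor
    · exact fun hp => ⟨by rw [← List.getD_eq_getElem ps ' ' hjl, ← List.getD_eq_getElem cs ' ' hk]; exact he, hp⟩
    · exact fun h => h.2
  | case2 k j h =>
    intro hj
    rw [pvInnerMC, if_neg h]
    rcases Nat.eq_or_lt_of_le hj with he | hlt
    · simp [he]
    · constructor
      · omega
      · intro hp
        exfalso
        rw [List.drop_eq_getElem_cons hlt] at hp
        by_cases hk : k < cs.length
        · rw [List.drop_eq_getElem_cons hk, List.cons_prefix_cons] at hp
          exact h ⟨hk, hlt, by rw [List.getD_eq_getElem ps ' ' hlt, List.getD_eq_getElem cs ' ' hk]; exact hp.1⟩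
        · rw [List.drop_eq_nil_of_le (by omega : cs.length ≤ k)] at hp
          simp at hp
          omega

-- closed form of A's outer loop: positions = gated full matches over range(n1), count of chars ≠ patron[0]
theorem pvOuterMC_eq (cs ps : List Char) (i : Nat) (pos : List Int) (comp : Int) :
    pvOuterMC cs ps i pos comp =
      (pos ++ ((List.range' i (cs.length - i)).filter
          (fun t => (cs.getD t ' ' == ps.getD 0 ' ') &&
                    (pvInnerMC cs ps t 0 == ps.length))).map (fun t : Nat => (t : Int)),
       comp + (((cs.drop i).countP (fun c => c != ps.getD 0 ' ') : Nat) : Int)) := by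
  induction i, pos, comp using pvOuterMC.induct cs ps with
  | case1 i pos comp h hg ih =>
    simp only [dite_eq_ite] at ih
    rw [pvOuterMC, dif_pos h, if_pos hg, ih]
    have hr : List.range' i (cs.length - i) = i :: List.range' (i + 1) (cs.length - (i + 1)) := by
      have hn : cs.length - i = (cs.length - (i + 1)) + 1 := by omega
      rw [hn, List.range'_succ]
    have he : cs[i] = ps.getD 0 ' ' := by rw [← List.getD_eq_getElem cs ' ' h]; exact hg
    rw [hr, List.filter_cons, List.drop_eq_getElem_cons h, List.countP_cons]
    have hgate : (cs.getD i ' ' == ps.getD 0 ' ') = true := beq_iff_eq.mpr hg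
    have hg2 : cs[i]?.getD ' ' = ps[0]?.getD ' ' := by
      simpa [List.getD_eq_getElem?_getD] using hg
    by_cases hin : pvInnerMC cs ps i 0 = ps.length
    · simp [hin, he, hg2]
    · have hf : (pvInnerMC cs ps i 0 == ps.length) = false := beq_eq_false_iff_ne.mpr hin
      simp [hf, hin, he, hg2]
  | case2 i pos comp h hg ih =>
    rw [pvOuterMC, dif_pos h, if_neg hg, ih]
    have hr : List.range' i (cs.length - i) = i :: List.range' (i + 1) (cs.length - (i + 1)) := by
      have hn : cs.length - i = (cs.length - (i + 1)) + 1 := by omega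
      rw [hn, List.range'_succ]
    have he : cs[i] ≠ ps.getD 0 ' ' := by rw [← List.getD_eq_getElem cs ' ' h]; exact hg
    rw [hr, List.filter_cons, List.drop_eq_getElem_cons h, List.countP_cons]
    have hgate : (cs.getD i ' ' == ps.getD 0 ' ') = false := beq_eq_false_iff_ne.mpr hg
    have he2 : cs[i] ≠ ps[0]?.getD ' ' := by
      simpa [List.getD_eq_getElem?_getD] using he
    simp only [hgate, Bool.false_and]
    simp [he2]
    omega
  | case3 i pos comp h =>
    rw [pvOuterMC, dif_neg h]
    have h1 : cs.length - i = 0 := by omega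
    have h2 : cs.drop i = [] := List.drop_eq_nil_of_le (by omega)
    simp [h1, h2]

theorem main_eq (cadena patron : String) (hpre : patron.toList ≠ []) :
    BusquedaNaive cadena patron = BusquedaNaive_alt cadena patron := by
  unfold BusquedaNaive BusquedaNaive_alt
  set cs := cadena.toList with hcs
  set ps := patron.toList with hps
  by_cases hlt : cs.length < ps.length
  · simp [hlt]
  · simp only [if_neg hlt]
    have hn2 : 0 < ps.length := List.length_pos_of_ne_nil hpre
    have hn1 : ps.length ≤ cs.length := by omega
    have hiff : ∀ t : Nat,
        ((cs.getD t ' ' == ps.getD 0 ' ') && (pvInnerMC cs ps t 0 == ps.length)) = true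
          ↔ ps <+: cs.drop t := by
      intro t
      rw [Bool.and_eq_true, beq_iff_eq, beq_iff_eq,
        pvInnerMC_eq_iff cs ps t 0 (by omega), List.drop_zero]
      constructor
      · exact fun h => h.2
      · intro hp
        refine ⟨?_, hp⟩
        have ht : t < cs.length := by
          by_contra hge
          rw [List.drop_eq_nil_of_le (by omega)] at hp
          rcases hq : ps with _ | ⟨a, l⟩
          · exact hpre (hps ▸ hq)
          · rw [hq] at hp; simp at hp
        obtain ⟨a, l, hal⟩ : ∃ a l, ps = a :: l := by
          rcases hq : ps with _ | ⟨a, l⟩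
          · exact absurd (hps ▸ hq) hpre
          · exact ⟨a, l, rfl⟩
        rw [hal, List.drop_eq_getElem_cons ht, List.cons_prefix_cons] at hp
        rw [hal]
        rw [List.getD_eq_getElem cs ' ' ht]
        simpa using hp.1.symm
    have hbiff : ∀ t : Nat,
        (PySem.List.slice cs (some (t : Int)) (some ((t : Int) + (ps.length : Int))) == ps) = true
          ↔ ps <+: cs.drop t := by
      intro t
      rw [PySem.List.slice_natCast_add cs t ps.length, beq_iff_eq, List.prefix_iff_eq_take]
      exact ⟨fun h => h.symm, fun h => h.symm⟩
    have hsplit : List.range cs.length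
        = List.range (cs.length - ps.length + 1) ++ List.range' (cs.length - ps.length + 1) (ps.length - 1) := by
      rw [List.range_eq_range', List.range_eq_range']
      have h := List.range'_append (s := 0) (m := cs.length - ps.length + 1) (n := ps.length - 1) (step := 1)
      rw [show 0 + 1 * (cs.length - ps.length + 1) = cs.length - ps.length + 1 by omega,
        show cs.length - ps.length + 1 + (ps.length - 1) = cs.length by omega] at h
      exact h.symm
    have hpos : (List.range' 0 (cs.length - 0)).filter
          (fun t => (cs.getD t ' ' == ps.getD 0 ' ') && (pvInnerMC cs ps t 0 == ps.length))
        = (List.range (cs.length - ps.length + 1)).filter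
          (fun t : Nat => PySem.List.slice cs (some ((t : Nat) : Int)) (some (((t : Nat) : Int) + (ps.length : Int))) == ps) := by
      rw [show cs.length - 0 = cs.length by omega, ← List.range_eq_range', hsplit, List.filter_append]
      have hnil : (List.range' (cs.length - ps.length + 1) (ps.length - 1)).filter
          (fun t => (cs.getD t ' ' == ps.getD 0 ' ') && (pvInnerMC cs ps t 0 == ps.length)) = [] := by
        apply List.filter_eq_nil_iff.mpr
        intro t ht
        rw [List.mem_range'_1] at ht
        intro hP
        have hp := (hiff t).mp hP
        have hlen := hp.length_le
        rw [List.length_drop] at hlen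
        omega
      rw [hnil, List.append_nil]
      exact List.filter_congr (fun t _ => by
        rw [Bool.eq_iff_iff, hiff t, hbiff t])
    rw [pvOuterMC_eq cs ps 0 [] 0]
    congr 1
    refine Prod.ext ?_ ?_
    · show _ = (PySem.List.pyRange 0 ((cs.length - ps.length + 1 : Nat) : Int) 1).filter _
      rw [List.nil_append, hpos, PySem.List.pyRange_zero_natCast, List.filter_map]
      simp only [Function.comp_def]
    · show (0 : Int) + _ = _
      simp only [List.drop_zero]
      rw [PySem.List.sum_map_const_int, ← List.countP_eq_length_filter]
      omega

-- ===== VERDICT (by name: the statement is the Claim_ definition above) =====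
theorem BusquedaNaive_spec : Claim_equal_BusquedaNaive := by
  intro cadena patron _hdom hpre
  unfold Spec_BusquedaNaive
  exact main_eq cadena patron hpre
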